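-- pv_equiv track=rewrite | github.com/WandererGuy/TarGuess-I-main | GUESS/src/a_person_analyze.py | process_account
-- ===== SOURCE A (Python) =====
-- def process_account(account):
--     account_dict = {}
--     if account == '':
--
--         return None
--     account_dict['A'] = account
--     acc_d = ""  # To store digits
--     acc_l = ""  # To store letters
--     ad = False  # Flag to check if any digit is found
--     al = False  # Flag to check if any letter is found
--
--     # Extract the first sequence of digits from the account
--     for char in account:
--         if char.isdigit():
--             acc_d += char
--             ad = True
--         elif ad:
--             # Stop if we hit a non-digit after finding digits
--             break
--
--     # Extract the first sequence of letters from the account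
--     for char in account:
--         if char.isalpha():
--             acc_l += char
--             al = True
--         elif al:
--             # Stop if we hit a non-letter after finding letters
--             break
--
--     # Simulate handling of the tags
--     if ad and acc_d != account:
--         account_dict['u'] = acc_d
--     if al and acc_l != account:
--         account_dict['v'] = acc_l
--     return account_dict
-- ===== SOURCE B (Python) =====
-- def _first_run(s, pred):
--     # skip the prefix of characters failing pred, then take the maximal run satisfying it
--     n = len(s)
--     i = 0
--     while i < n and not pred(s[i]):
--         i += 1
--     j = i
--     while j < n and pred(s[j]):
--         j += 1
--     return s[i:j]
--
--
-- def process_account(account):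
--     if account == '':
--         return None
--     account_dict = {'A': account}
--     acc_d = _first_run(account, str.isdigit)
--     acc_l = _first_run(account, str.isalpha)
--     if acc_d and acc_d != account:
--         account_dict['u'] = acc_d
--     if acc_l and acc_l != account:
--         account_dict['v'] = acc_l
--     return account_dict
-- ===== Notes on version B (the rewrite author's own statement) =====
-- stated objective: simpler
-- what changed: Replaces A's two flag-carrying scan-with-break loops by a shared first-run helper that skips the non-matching prefix and then takes the maximal matching run (dropWhile/takeWhile decomposition), with the non-empty run itself serving as the flag.
import Mathlib
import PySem

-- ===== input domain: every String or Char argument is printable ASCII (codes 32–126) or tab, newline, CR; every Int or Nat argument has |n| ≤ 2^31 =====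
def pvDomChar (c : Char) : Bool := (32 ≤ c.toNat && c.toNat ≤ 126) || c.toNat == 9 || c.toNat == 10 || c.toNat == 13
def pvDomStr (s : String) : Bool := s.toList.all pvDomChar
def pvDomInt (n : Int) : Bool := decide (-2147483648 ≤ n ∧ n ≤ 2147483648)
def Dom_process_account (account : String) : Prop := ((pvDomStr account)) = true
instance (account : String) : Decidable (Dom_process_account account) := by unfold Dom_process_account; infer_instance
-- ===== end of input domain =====

-- B replaces A's two flag-carrying scan-with-break loops by a shared dropWhile/takeWhile first-run helper (simpler decomposition, same O(n) cost).

-- ===== PORT A =====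
-- A's for-loop over the characters: accumulator acc, flag fl; break on first non-match after a match.
def paRun (p : Char → Bool) : List Char → List Char → Bool → List Char × Bool
  | [], acc, fl => (acc, fl)
  | c :: t, acc, fl =>
    if p c then paRun p t (acc ++ [c]) true
    else if fl then (acc, fl) else paRun p t acc fl

def process_account (account : String) : Option (List (String × String)) :=
  if account = "" then none
  else
    let cs := account.toList
    let dres := paRun PySem.Chars.isdigit cs [] false
    let lres := paRun PySem.Chars.isalpha cs [] false
    let d := (PySem.Dict.empty).insert "A" account
    let d := if dres.2 && (String.mk dres.1 != account) then d.insert "u" (String.mk dres.1) else d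
    let d := if lres.2 && (String.mk lres.1 != account) then d.insert "v" (String.mk lres.1) else d
    some d.items

-- ===== PORT B =====
-- Source B's _first_run: the first while loop skips chars failing pred (dropWhile), the second takes the run (takeWhile).
def firstRun (p : Char → Bool) (cs : List Char) : List Char :=
  (cs.dropWhile (fun c => !p c)).takeWhile p

def process_account_alt (account : String) : Option (List (String × String)) :=
  if account = "" then none
  else
    let cs := account.toList
    let accD := firstRun PySem.Chars.isdigit cs
    let accL := firstRun PySem.Chars.isalpha cs
    let d := (PySem.Dict.empty).insert "A" account
    let d := if (!accD.isEmpty) && (String.mk accD != account) then d.insert "u" (String.mk accD) else d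
    let d := if (!accL.isEmpty) && (String.mk accL != account) then d.insert "v" (String.mk accL) else d
    some d.items

-- ===== PRECONDITION & SPEC =====
def Spec_process_account (account : String) (out : Option (List (String × String))) : Prop := out = process_account_alt account
instance (account : String) (out : Option (List (String × String))) : Decidable (Spec_process_account account out) := by unfold Spec_process_account; infer_instance

-- ===== CLAIM (what is proved, stated in full; the proofs are below) =====
def Claim_equal_process_account : Prop := ∀ (account : String), Dom_process_account account → Spec_process_account account (process_account account)

-- ===== LEMMAS AND PROOFS =====

-- Once the flag is set, A's loop just extends the accumulator with the run at the front of the rest.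
theorem paRun_true (p : Char → Bool) (t acc : List Char) :
    paRun p t acc true = (acc ++ t.takeWhile p, true) := by
  induction t generalizing acc with
  | nil => simp [paRun]
  | cons c t ih =>
    by_cases h : p c = true
    · simp [paRun, h, ih]
    · simp [paRun, h]

-- A's loop from the initial state computes B's first run, and its flag is List.any.
theorem paRun_eq (p : Char → Bool) (cs : List Char) :
    paRun p cs [] false = ((cs.dropWhile fun c => !p c).takeWhile p, cs.any p) := by
  induction cs with
  | nil => simp [paRun]
  | cons c t ih =>
    by_cases h : p c = true
    · simp [paRun, h, paRun_true, List.dropWhile]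
    · simp [paRun, h, ih, List.dropWhile]

-- any p cs is exactly "the first run is non-empty".
theorem any_eq_run_nonempty (p : Char → Bool) (cs : List Char) :
    cs.any p = !((cs.dropWhile fun c => !p c).takeWhile p).isEmpty := by
  induction cs with
  | nil => simp
  | cons c t ih =>
    by_cases h : p c = true
    · simp [h, List.dropWhile]
    · simp [h, List.dropWhile, ih]

-- ===== VERDICT (by name: the statement is the Claim_ definition above) =====
theorem process_account_spec : Claim_equal_process_account := by
  intro account _
  unfold Spec_process_account process_account process_account_alt
  by_cases h : account = ""
  · simp [h]
  · simp only [h, if_false, paRun_eq, firstRun,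
      any_eq_run_nonempty PySem.Chars.isdigit account.toList,
      any_eq_run_nonempty PySem.Chars.isalpha account.toList]
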